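-- pv_equiv track=rewrite | github.com/Mushi0/Advent-of-Code---Save-Christmas-2023 | Python/D14_2_3_try_to_find_cycle_it_worked.py | roll
-- ===== SOURCE A (Python) =====
-- def roll(N_ROWS, N_COLS, rocks: set, stable_rocks: set):
--     # north
--     new_stable_rocks = stable_rocks.copy()
--     for j in range(N_COLS):
--         for i in range(N_ROWS):
--             if (i, j) in rocks:
--                 fixed = False
--                 for k in range(1, i + 1):
--                     if (i - k, j) in new_stable_rocks:
--                         new_stable_rocks.add((i - k + 1, j))
--                         rocks.remove((i, j))
--                         rocks.add((i - k + 1, j))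
--                         fixed = True
--                         break
--                 if not fixed:
--                     rocks.remove((i, j))
--                     rocks.add((0, j))
--                     new_stable_rocks.add((0, j))
--
--     # west
--     new_stable_rocks = stable_rocks.copy()
--     for i in range(N_ROWS):
--         for j in range(N_COLS):
--             if (i, j) in rocks:
--                 fixed = False
--                 for k in range(1, j + 1):
--                     if (i, j - k) in new_stable_rocks:
--                         new_stable_rocks.add((i, j - k + 1))
--                         rocks.remove((i, j))
--                         rocks.add((i, j - k + 1))
--                         fixed = True
--                         break
--                 if not fixed:
--                     rocks.remove((i, j))
--                     rocks.add((i, 0))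
--                     new_stable_rocks.add((i, 0))
--
--     # south
--     new_stable_rocks = stable_rocks.copy()
--     for j in range(N_COLS):
--         for i in range(N_ROWS - 1, -1, -1):
--             if (i, j) in rocks:
--                 fixed = False
--                 for k in range(1, N_ROWS - i):
--                     if (i + k, j) in new_stable_rocks:
--                         new_stable_rocks.add((i + k - 1, j))
--                         rocks.remove((i, j))
--                         rocks.add((i + k - 1, j))
--                         fixed = True
--                         break
--                 if not fixed:
--                     rocks.remove((i, j))
--                     rocks.add((N_ROWS - 1, j))
--                     new_stable_rocks.add((N_ROWS - 1, j))
--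
--     # east
--     new_stable_rocks = stable_rocks.copy()
--     for i in range(N_ROWS):
--         for j in range(N_COLS - 1, -1, -1):
--             if (i, j) in rocks:
--                 fixed = False
--                 for k in range(1, N_COLS - j):
--                     if (i, j + k) in new_stable_rocks:
--                         new_stable_rocks.add((i, j + k - 1))
--                         rocks.remove((i, j))
--                         rocks.add((i, j + k - 1))
--                         fixed = True
--                         break
--                 if not fixed:
--                     rocks.remove((i, j))
--                     rocks.add((i, N_COLS - 1))
--                     new_stable_rocks.add((i, N_COLS - 1))
--
--     return rocks
-- ===== SOURCE B (Python) =====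
-- def roll(N_ROWS, N_COLS, rocks: set, stable_rocks: set):
--     # One linear sweep per line and direction: the next landing slot is carried
--     # incrementally and reset past each stable rock, so no backward search and
--     # no auxiliary set of settled obstacles is needed.
--     # north
--     for j in range(N_COLS):
--         slot = 0
--         for i in range(N_ROWS):
--             if (i, j) in rocks:
--                 rocks.remove((i, j))
--                 rocks.add((slot, j))
--                 slot += 1
--             if (i, j) in stable_rocks:
--                 slot = i + 1
--     # west
--     for i in range(N_ROWS):
--         slot = 0
--         for j in range(N_COLS):
--             if (i, j) in rocks:
--                 rocks.remove((i, j))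
--                 rocks.add((i, slot))
--                 slot += 1
--             if (i, j) in stable_rocks:
--                 slot = j + 1
--     # south
--     for j in range(N_COLS):
--         slot = N_ROWS - 1
--         for i in range(N_ROWS - 1, -1, -1):
--             if (i, j) in rocks:
--                 rocks.remove((i, j))
--                 rocks.add((slot, j))
--                 slot -= 1
--             if (i, j) in stable_rocks:
--                 slot = i - 1
--     # east
--     for i in range(N_ROWS):
--         slot = N_COLS - 1
--         for j in range(N_COLS - 1, -1, -1):
--             if (i, j) in rocks:
--                 rocks.remove((i, j))
--                 rocks.add((i, slot))
--                 slot -= 1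
--             if (i, j) in stable_rocks:
--                 slot = j - 1
--     return rocks
-- ===== Notes on version B (the rewrite author's own statement) =====
-- stated objective: simpler
-- what changed: Instead of re-scanning backwards from every rock for the nearest settled/stable obstacle and maintaining an auxiliary set of settled obstacles, B does one linear sweep per line and direction, carrying the next landing slot incrementally and resetting it past each stable rock, so the inner backward scan and the auxiliary set disappear.
import Mathlib
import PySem

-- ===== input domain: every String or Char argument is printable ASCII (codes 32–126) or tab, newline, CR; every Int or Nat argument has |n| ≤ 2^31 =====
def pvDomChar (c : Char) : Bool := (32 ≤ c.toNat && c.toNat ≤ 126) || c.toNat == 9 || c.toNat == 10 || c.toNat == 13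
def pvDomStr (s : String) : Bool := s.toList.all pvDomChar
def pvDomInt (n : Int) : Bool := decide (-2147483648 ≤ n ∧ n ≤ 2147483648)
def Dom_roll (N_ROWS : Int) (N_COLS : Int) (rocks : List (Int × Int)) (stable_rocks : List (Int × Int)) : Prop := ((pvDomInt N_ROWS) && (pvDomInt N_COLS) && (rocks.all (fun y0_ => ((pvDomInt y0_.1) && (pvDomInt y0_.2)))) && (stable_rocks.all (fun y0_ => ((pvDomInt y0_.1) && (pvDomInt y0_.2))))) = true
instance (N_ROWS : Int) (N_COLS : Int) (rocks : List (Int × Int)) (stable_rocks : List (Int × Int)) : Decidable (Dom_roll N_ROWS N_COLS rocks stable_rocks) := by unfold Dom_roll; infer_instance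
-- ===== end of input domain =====

-- B replaces A's per-rock backward scan for the nearest obstacle (and its auxiliary set of
-- settled obstacles) by one linear sweep per line and direction, carrying the next landing
-- slot incrementally (objective: simpler).  Both A and B mutate the `rocks` set argument in
-- place in the same way and return it.

-- ===== PORT A =====
-- Python's `rocks.remove(x)` is only reached with x ∈ rocks (guarded by `(i, j) in rocks`),
-- so PySem.Set.discard is exact for it.  The sets are PySem.Set; `new_stable_rocks =
-- stable_rocks.copy()` restarts each phase from the stable set.
def roll (N_ROWS : Int) (N_COLS : Int) (rocks : List (Int × Int)) (stable_rocks : List (Int × Int)) : List (Int × Int) :=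
  let rocks0 : PySem.Set (Int × Int) := PySem.Set.ofList rocks
  let stable : PySem.Set (Int × Int) := PySem.Set.ofList stable_rocks
  -- north
  let stN := (PySem.List.pyRange 0 N_COLS 1).foldl (fun st j =>
      (PySem.List.pyRange 0 N_ROWS 1).foldl (fun (st : PySem.Set (Int × Int) × PySem.Set (Int × Int)) i =>
        if st.1.contains (i, j) then
          match (PySem.List.pyRange 1 (i + 1) 1).find? (fun k => st.2.contains (i - k, j)) with
          | some k => (PySem.Set.add (PySem.Set.discard st.1 (i, j)) (i - k + 1, j),
                       PySem.Set.add st.2 (i - k + 1, j))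
          | none => (PySem.Set.add (PySem.Set.discard st.1 (i, j)) (0, j),
                     PySem.Set.add st.2 (0, j))
        else st) st) (rocks0, stable)
  -- west
  let stW := (PySem.List.pyRange 0 N_ROWS 1).foldl (fun st i =>
      (PySem.List.pyRange 0 N_COLS 1).foldl (fun (st : PySem.Set (Int × Int) × PySem.Set (Int × Int)) j =>
        if st.1.contains (i, j) then
          match (PySem.List.pyRange 1 (j + 1) 1).find? (fun k => st.2.contains (i, j - k)) with
          | some k => (PySem.Set.add (PySem.Set.discard st.1 (i, j)) (i, j - k + 1),
                       PySem.Set.add st.2 (i, j - k + 1))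
          | none => (PySem.Set.add (PySem.Set.discard st.1 (i, j)) (i, 0),
                     PySem.Set.add st.2 (i, 0))
        else st) st) (stN.1, stable)
  -- south
  let stS := (PySem.List.pyRange 0 N_COLS 1).foldl (fun st j =>
      (PySem.List.pyRange (N_ROWS - 1) (-1) (-1)).foldl (fun (st : PySem.Set (Int × Int) × PySem.Set (Int × Int)) i =>
        if st.1.contains (i, j) then
          match (PySem.List.pyRange 1 (N_ROWS - i) 1).find? (fun k => st.2.contains (i + k, j)) with
          | some k => (PySem.Set.add (PySem.Set.discard st.1 (i, j)) (i + k - 1, j),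
                       PySem.Set.add st.2 (i + k - 1, j))
          | none => (PySem.Set.add (PySem.Set.discard st.1 (i, j)) (N_ROWS - 1, j),
                     PySem.Set.add st.2 (N_ROWS - 1, j))
        else st) st) (stW.1, stable)
  -- east
  let stE := (PySem.List.pyRange 0 N_ROWS 1).foldl (fun st i =>
      (PySem.List.pyRange (N_COLS - 1) (-1) (-1)).foldl (fun (st : PySem.Set (Int × Int) × PySem.Set (Int × Int)) j =>
        if st.1.contains (i, j) then
          match (PySem.List.pyRange 1 (N_COLS - j) 1).find? (fun k => st.2.contains (i, j + k)) with
          | some k => (PySem.Set.add (PySem.Set.discard st.1 (i, j)) (i, j + k - 1),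
                       PySem.Set.add st.2 (i, j + k - 1))
          | none => (PySem.Set.add (PySem.Set.discard st.1 (i, j)) (i, N_COLS - 1),
                     PySem.Set.add st.2 (i, N_COLS - 1))
        else st) st) (stS.1, stable)
  stE.1

-- ===== PORT B =====
-- `rocks.remove` is again only reached under `(i, j) in rocks`, so discard is exact.
def roll_alt (N_ROWS : Int) (N_COLS : Int) (rocks : List (Int × Int)) (stable_rocks : List (Int × Int)) : List (Int × Int) :=
  let s0 : PySem.Set (Int × Int) := PySem.Set.ofList rocks
  let stable : PySem.Set (Int × Int) := PySem.Set.ofList stable_rocks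
  -- north
  let s1 := (PySem.List.pyRange 0 N_COLS 1).foldl (fun s j =>
      ((PySem.List.pyRange 0 N_ROWS 1).foldl (fun (st : PySem.Set (Int × Int) × Int) i =>
          let st := if st.1.contains (i, j) then (PySem.Set.add (PySem.Set.discard st.1 (i, j)) (st.2, j), st.2 + 1) else st
          if stable.contains (i, j) then (st.1, i + 1) else st) (s, 0)).1) s0
  -- west
  let s2 := (PySem.List.pyRange 0 N_ROWS 1).foldl (fun s i =>
      ((PySem.List.pyRange 0 N_COLS 1).foldl (fun (st : PySem.Set (Int × Int) × Int) j =>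
          let st := if st.1.contains (i, j) then (PySem.Set.add (PySem.Set.discard st.1 (i, j)) (i, st.2), st.2 + 1) else st
          if stable.contains (i, j) then (st.1, j + 1) else st) (s, 0)).1) s1
  -- south
  let s3 := (PySem.List.pyRange 0 N_COLS 1).foldl (fun s j =>
      ((PySem.List.pyRange (N_ROWS - 1) (-1) (-1)).foldl (fun (st : PySem.Set (Int × Int) × Int) i =>
          let st := if st.1.contains (i, j) then (PySem.Set.add (PySem.Set.discard st.1 (i, j)) (st.2, j), st.2 - 1) else st
          if stable.contains (i, j) then (st.1, i - 1) else st) (s, N_ROWS - 1)).1) s2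
  -- east
  let s4 := (PySem.List.pyRange 0 N_ROWS 1).foldl (fun s i =>
      ((PySem.List.pyRange (N_COLS - 1) (-1) (-1)).foldl (fun (st : PySem.Set (Int × Int) × Int) j =>
          let st := if st.1.contains (i, j) then (PySem.Set.add (PySem.Set.discard st.1 (i, j)) (i, st.2), st.2 - 1) else st
          if stable.contains (i, j) then (st.1, j - 1) else st) (s, N_COLS - 1)).1) s3
  s4

-- ===== PRECONDITION & SPEC =====
def Spec_roll (N_ROWS : Int) (N_COLS : Int) (rocks : List (Int × Int)) (stable_rocks : List (Int × Int)) (out : List (Int × Int)) : Prop := out = roll_alt N_ROWS N_COLS rocks stable_rocks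
instance (N_ROWS : Int) (N_COLS : Int) (rocks : List (Int × Int)) (stable_rocks : List (Int × Int)) (out : List (Int × Int)) : Decidable (Spec_roll N_ROWS N_COLS rocks stable_rocks out) := by unfold Spec_roll; infer_instance

-- ===== CLAIM (what is proved, stated in full; the proofs are below) =====
def Claim_equal_roll : Prop := ∀ (N_ROWS : Int) (N_COLS : Int) (rocks : List (Int × Int)) (stable_rocks : List (Int × Int)), Dom_roll N_ROWS N_COLS rocks stable_rocks → Spec_roll N_ROWS N_COLS rocks stable_rocks (roll N_ROWS N_COLS rocks stable_rocks)

-- ===== LEMMAS AND PROOFS =====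

theorem pv_find?_pyRange_eq_none {p : Int → Bool} {a b : Int}
    (h : ∀ m, a ≤ m → m < b → p m = false) :
    (PySem.List.pyRange a b 1).find? p = none := by
  rw [List.find?_eq_none]
  intro x hx
  rw [PySem.List.mem_pyRange_one] at hx
  simp [h x hx.1 hx.2]

theorem pv_find?_pyRange_eq_some {p : Int → Bool} {a b k : Int}
    (h1 : a ≤ k) (h2 : k < b) (hk : p k = true)
    (hmin : ∀ m, a ≤ m → m < k → p m = false) :
    (PySem.List.pyRange a b 1).find? p = some k := by
  rw [PySem.List.pyRange_one_append a k b h1 (le_of_lt h2), List.find?_append]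
  rw [pv_find?_pyRange_eq_none hmin]
  rw [PySem.List.pyRange_one_cons h2]
  simp [hk]

-- A's inner-loop body, over a direction `c` (line o, position u along the tilt)
def pvStepA (c : Int → Int → Int × Int) (o : Int) (st : PySem.Set (Int × Int) × PySem.Set (Int × Int)) (u : Int) : PySem.Set (Int × Int) × PySem.Set (Int × Int) :=
  if st.1.contains (c o u) then
    match (PySem.List.pyRange 1 (u + 1) 1).find? (fun k => st.2.contains (c o (u - k))) with
    | some k => (PySem.Set.add (PySem.Set.discard st.1 (c o u)) (c o (u - k + 1)),
                 PySem.Set.add st.2 (c o (u - k + 1)))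
    | none => (PySem.Set.add (PySem.Set.discard st.1 (c o u)) (c o 0),
               PySem.Set.add st.2 (c o 0))
  else st

-- B's inner-loop body: same set, plus the incremental landing slot
def pvStepB (stable : PySem.Set (Int × Int)) (c : Int → Int → Int × Int) (o : Int) (st : PySem.Set (Int × Int) × Int) (u : Int) : PySem.Set (Int × Int) × Int :=
  let st' := if st.1.contains (c o u) then (PySem.Set.add (PySem.Set.discard st.1 (c o u)) (c o st.2), st.2 + 1) else st
  if stable.contains (c o u) then (st'.1, u + 1) else st'

-- one line: A's backward search always lands exactly at B's incremental slot, so the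
-- two folds thread the SAME rock set; ns only grows, and only by cells of line o.
theorem pv_line (c : Int → Int → Int × Int) (L : Int)
    (stable : PySem.Set (Int × Int))
    (hc : ∀ o u o' u', c o u = c o' u' → o = o' ∧ u = u')
    (o : Int) :
    ∀ (n : Nat) (u : Int) (s ns : PySem.Set (Int × Int)) (slot : Int),
    0 ≤ u → u + n = L → 0 ≤ slot → slot ≤ u →
    (∀ v, slot ≤ v → v < u → c o v ∉ ns) →
    (slot = 0 ∨ c o (slot - 1) ∈ ns) →
    (∀ v, u ≤ v → (c o v ∈ ns ↔ c o v ∈ stable)) →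
    ∃ s' ns' slot',
      (PySem.List.pyRange u L 1).foldl (pvStepA c o) (s, ns) = (s', ns') ∧
      (PySem.List.pyRange u L 1).foldl (pvStepB stable c o) (s, slot) = (s', slot') ∧
      (∀ x, x ∈ ns → x ∈ ns') ∧
      (∀ x, x ∈ ns' → x ∈ ns ∨ ∃ v, x = c o v) := by
  intro n
  induction n with
  | zero =>
    intro u s ns slot hu0 huL hs0 hsu hfree hprev hns
    have hu : u = L := by omega
    subst hu
    rw [PySem.List.pyRange_one_eq_nil le_rfl]
    exact ⟨s, ns, slot, rfl, rfl, fun x h => h, fun x h => Or.inl h⟩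
  | succ n ih =>
    intro u s ns slot hu0 huL hs0 hsu hfree hprev hns
    have huL' : u < L := by omega
    rw [PySem.List.pyRange_one_cons huL']
    rw [List.foldl_cons, List.foldl_cons]
    by_cases hcx : (c o u) ∈ s
    · -- a rock sits at c o u : it lands at `slot` in both versions
      have hcon : PySem.Set.contains s (c o u) = true := (PySem.Set.contains_iff _ _).mpr hcx
      have hA : pvStepA c o (s, ns) u =
          (PySem.Set.add (PySem.Set.discard s (c o u)) (c o slot), PySem.Set.add ns (c o slot)) := by
        have hfalse : ∀ m, (1:Int) ≤ m → m < u - slot + 1 →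
            (fun k => PySem.Set.contains ns (c o (u - k))) m = false := by
          intro m h1 h2
          have hnot : c o (u - m) ∉ ns := hfree (u - m) (by omega) (by omega)
          exact Bool.eq_false_iff.mpr (fun hb => hnot ((PySem.Set.contains_iff _ _).mp hb))
        by_cases hsz : slot = 0
        · have hfind : (PySem.List.pyRange 1 (u + 1) 1).find?
              (fun k => PySem.Set.contains ns (c o (u - k))) = none := by
            apply pv_find?_pyRange_eq_none
            intro m h1 h2
            exact hfalse m h1 (by omega)
          simp only [pvStepA, hcon, if_true, hfind, hsz]
        · have hmem : c o (slot - 1) ∈ ns := hprev.resolve_left hsz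
          have hfind : (PySem.List.pyRange 1 (u + 1) 1).find?
              (fun k => PySem.Set.contains ns (c o (u - k))) = some (u - slot + 1) := by
            apply pv_find?_pyRange_eq_some (by omega) (by omega)
            · have : u - (u - slot + 1) = slot - 1 := by omega
              rw [this]
              exact (PySem.Set.contains_iff _ _).mpr hmem
            · exact hfalse
          simp only [pvStepA, hcon, if_true, hfind]
          rw [show u - (u - slot + 1) + 1 = slot by omega]
      have hnsu : ∀ v, u + 1 ≤ v →
          (c o v ∈ PySem.Set.add ns (c o slot) ↔ c o v ∈ stable) := by
        intro v hv
        rw [PySem.Set.mem_add]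
        constructor
        · rintro (h | h)
          · exact (hns v (by omega)).mp h
          · obtain ⟨-, h2⟩ := hc _ _ _ _ h
            omega
        · intro h
          exact Or.inl ((hns v (by omega)).mpr h)
      by_cases hstb : (c o u) ∈ stable
      · have hconS : PySem.Set.contains stable (c o u) = true := (PySem.Set.contains_iff _ _).mpr hstb
        have hB : pvStepB stable c o (s, slot) u =
            (PySem.Set.add (PySem.Set.discard s (c o u)) (c o slot), u + 1) := by
          simp only [pvStepB, hcon, hconS, if_true]
        obtain ⟨s', ns', slot', ih1, ih2, ih3, ih4⟩ :=
          ih (u + 1) (PySem.Set.add (PySem.Set.discard s (c o u)) (c o slot))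
            (PySem.Set.add ns (c o slot)) (u + 1) (by omega) (by omega) (by omega) le_rfl
            (by intro v h1 h2; omega)
            (Or.inr (by
              rw [show u + 1 - 1 = u by omega, PySem.Set.mem_add]
              exact Or.inl ((hns u le_rfl).mpr hstb)))
            hnsu
        refine ⟨s', ns', slot', by rw [hA, ih1], by rw [hB, ih2], ?_, ?_⟩
        · intro x hx; exact ih3 x (by rw [PySem.Set.mem_add]; exact Or.inl hx)
        · intro x hx
          rcases ih4 x hx with hx | hx
          · rw [PySem.Set.mem_add] at hx
            rcases hx with hx | hx
            · exact Or.inl hx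
            · exact Or.inr ⟨slot, hx⟩
          · exact Or.inr hx
      · have hconS : PySem.Set.contains stable (c o u) = false :=
          Bool.eq_false_iff.mpr (fun hb => hstb ((PySem.Set.contains_iff _ _).mp hb))
        have hB : pvStepB stable c o (s, slot) u =
            (PySem.Set.add (PySem.Set.discard s (c o u)) (c o slot), slot + 1) := by
          simp only [pvStepB, hcon, hconS, if_true]
          simp
        obtain ⟨s', ns', slot', ih1, ih2, ih3, ih4⟩ :=
          ih (u + 1) (PySem.Set.add (PySem.Set.discard s (c o u)) (c o slot))
            (PySem.Set.add ns (c o slot)) (slot + 1) (by omega) (by omega) (by omega) (by omega)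
            (by intro v h1 h2
                rw [PySem.Set.mem_add]
                rintro (h | h)
                · by_cases hvu : v = u
                  · subst hvu
                    exact hstb ((hns v le_rfl).mp h)
                  · exact hfree v (by omega) (by omega) h
                · obtain ⟨-, h2'⟩ := hc _ _ _ _ h
                  omega)
            (Or.inr (by
              rw [show slot + 1 - 1 = slot by omega, PySem.Set.mem_add]
              exact Or.inr rfl))
            hnsu
        refine ⟨s', ns', slot', by rw [hA, ih1], by rw [hB, ih2], ?_, ?_⟩
        · intro x hx; exact ih3 x (by rw [PySem.Set.mem_add]; exact Or.inl hx)
        · intro x hx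
          rcases ih4 x hx with hx | hx
          · rw [PySem.Set.mem_add] at hx
            rcases hx with hx | hx
            · exact Or.inl hx
            · exact Or.inr ⟨slot, hx⟩
          · exact Or.inr hx
    · -- no rock at c o u : the set is untouched in both versions
      have hcon : PySem.Set.contains s (c o u) = false :=
        Bool.eq_false_iff.mpr (fun hb => hcx ((PySem.Set.contains_iff _ _).mp hb))
      have hA : pvStepA c o (s, ns) u = (s, ns) := by
        simp only [pvStepA, hcon]
        simp
      by_cases hstb : (c o u) ∈ stable
      · have hconS : PySem.Set.contains stable (c o u) = true := (PySem.Set.contains_iff _ _).mpr hstb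
        have hB : pvStepB stable c o (s, slot) u = (s, u + 1) := by
          simp only [pvStepB, hcon, hconS]
          simp
        obtain ⟨s', ns', slot', ih1, ih2, ih3, ih4⟩ :=
          ih (u + 1) s ns (u + 1) (by omega) (by omega) (by omega) le_rfl
            (by intro v h1 h2; omega)
            (Or.inr (by
              rw [show u + 1 - 1 = u by omega]
              exact (hns u le_rfl).mpr hstb))
            (by intro v hv; exact hns v (by omega))
        exact ⟨s', ns', slot', by rw [hA, ih1], by rw [hB, ih2], ih3, ih4⟩
      · have hconS : PySem.Set.contains stable (c o u) = false :=
          Bool.eq_false_iff.mpr (fun hb => hstb ((PySem.Set.contains_iff _ _).mp hb))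
        have hB : pvStepB stable c o (s, slot) u = (s, slot) := by
          simp only [pvStepB, hcon, hconS]
          simp
        obtain ⟨s', ns', slot', ih1, ih2, ih3, ih4⟩ :=
          ih (u + 1) s ns slot (by omega) (by omega) (by omega) (by omega)
            (by intro v h1 h2
                by_cases hvu : v = u
                · subst hvu
                  intro h
                  exact hstb ((hns v le_rfl).mp h)
                · exact hfree v h1 (by omega))
            hprev
            (by intro v hv; exact hns v (by omega))
        exact ⟨s', ns', slot', by rw [hA, ih1], by rw [hB, ih2], ih3, ih4⟩

-- a whole tilt phase: on every line still to be processed the obstacle set agrees with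
-- the stable set, so line after line the two folds keep the same rock set.
theorem pv_phase (c : Int → Int → Int × Int) (L : Int)
    (stable : PySem.Set (Int × Int))
    (hc : ∀ o u o' u', c o u = c o' u' → o = o' ∧ u = u') :
    ∀ (os : List Int), os.Nodup →
    ∀ (s ns : PySem.Set (Int × Int)),
    (∀ o ∈ os, ∀ v, (c o v ∈ ns ↔ c o v ∈ stable)) →
    (∀ x, x ∈ stable → x ∈ ns) →
    ∃ ns',
      (os.foldl (fun st o => (PySem.List.pyRange 0 L 1).foldl (pvStepA c o) st) (s, ns))
        = (os.foldl (fun s o => ((PySem.List.pyRange 0 L 1).foldl (pvStepB stable c o) (s, 0)).1) s, ns') := by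
  intro os
  induction os with
  | nil =>
    intro _ s ns _ _
    exact ⟨ns, rfl⟩
  | cons o os' ihos =>
    intro hnd s ns hline hstab
    have honot : o ∉ os' := (List.nodup_cons.mp hnd).1
    rw [List.foldl_cons, List.foldl_cons]
    by_cases hL : L ≤ 0
    · have hnil : PySem.List.pyRange 0 L 1 = [] := PySem.List.pyRange_one_eq_nil hL
      simp only [hnil, List.foldl_nil]
      rw [PySem.List.foldl_ignore, PySem.List.foldl_ignore]
      exact ⟨ns, rfl⟩
    · push_neg at hL
      obtain ⟨s1, ns1, slot1, h1A, h1B, h1mono, h1add⟩ :=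
        pv_line c L stable hc o L.toNat 0 s ns 0 le_rfl (by omega) le_rfl le_rfl
          (by intro v h1 h2; omega)
          (Or.inl rfl)
          (fun v _ => hline o List.mem_cons_self v)
      rw [h1A, h1B]
      exact ihos (List.nodup_cons.mp hnd).2 s1 ns1
        (by intro o' ho' v
            constructor
            · intro h
              rcases h1add _ h with h | ⟨w, hw⟩
              · exact (hline o' (List.mem_cons_of_mem _ ho') v).mp h
              · obtain ⟨rfl, -⟩ := hc _ _ _ _ hw
                exact absurd ho' honot
            · intro h
              exact h1mono _ ((hline o' (List.mem_cons_of_mem _ ho') v).mpr h))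
        (fun x hx => h1mono x (hstab x hx))

-- the descending range is the canonical one, reindexed
theorem pv_range_rev (R : Int) :
    PySem.List.pyRange (R - 1) (-1) (-1) = (PySem.List.pyRange 0 R 1).map (fun u => R - 1 - u) := by
  rw [PySem.List.pyRange_neg_one, PySem.List.pyRange_one, List.map_map]
  rw [show R - 1 - (-1) = R - 0 by ring]
  apply List.map_congr_left
  intro k _
  simp

def pvPhaseA (c : Int → Int → Int × Int) (L : Int) (lines : List Int)
    (rk ns : PySem.Set (Int × Int)) : PySem.Set (Int × Int) :=
  (lines.foldl (fun st o => (PySem.List.pyRange 0 L 1).foldl (pvStepA c o) st) (rk, ns)).1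

def pvPhaseB (stable : PySem.Set (Int × Int)) (c : Int → Int → Int × Int) (L : Int)
    (lines : List Int) (s : PySem.Set (Int × Int)) : PySem.Set (Int × Int) :=
  lines.foldl (fun s o => ((PySem.List.pyRange 0 L 1).foldl (pvStepB stable c o) (s, 0)).1) s

theorem pv_phase_top (c : Int → Int → Int × Int) (L : Int)
    (stable : PySem.Set (Int × Int))
    (hc : ∀ o u o' u', c o u = c o' u' → o = o' ∧ u = u')
    (lines : List Int) (hnd : lines.Nodup)
    (s : PySem.Set (Int × Int)) :
    pvPhaseA c L lines s stable = pvPhaseB stable c L lines s := by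
  obtain ⟨ns', h⟩ :=
    pv_phase c L stable hc lines hnd s stable (fun _ _ _ => Iff.rfl) (fun x hx => hx)
  unfold pvPhaseA pvPhaseB
  rw [h]

-- A's south/east blocks are the canonical step over the reversed position index
theorem pv_portA_S (R : Int) (j : Int) (st : PySem.Set (Int × Int) × PySem.Set (Int × Int)) :
    (PySem.List.pyRange (R - 1) (-1) (-1)).foldl (fun (st : PySem.Set (Int × Int) × PySem.Set (Int × Int)) i =>
        if st.1.contains (i, j) then
          match (PySem.List.pyRange 1 (R - i) 1).find? (fun k => st.2.contains (i + k, j)) with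
          | some k => (PySem.Set.add (PySem.Set.discard st.1 (i, j)) (i + k - 1, j),
                       PySem.Set.add st.2 (i + k - 1, j))
          | none => (PySem.Set.add (PySem.Set.discard st.1 (i, j)) (R - 1, j),
                     PySem.Set.add st.2 (R - 1, j))
        else st) st
    = (PySem.List.pyRange 0 R 1).foldl (pvStepA (fun o u => (R - 1 - u, o)) j) st := by
  rw [pv_range_rev, List.foldl_map]
  congr 1
  funext st' u
  show _ = pvStepA _ j st' u
  simp only [pvStepA]
  rw [show R - (R - 1 - u) = u + 1 by ring]
  have hpred : (fun k => st'.2.contains ((R - 1 - u + k : Int), j)) =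
      (fun k => st'.2.contains ((R - 1 - (u - k) : Int), j)) := by
    funext k; rw [show R - 1 - u + k = R - 1 - (u - k) by ring]
  rw [hpred]
  rcases hcon : st'.1.contains ((R - 1 - u : Int), j) with _ | _
  · simp [hcon]
  · simp only [hcon, if_true]
    rcases hfind : (PySem.List.pyRange 1 (u + 1) 1).find?
        (fun k => st'.2.contains ((R - 1 - (u - k) : Int), j)) with _ | k
    · simp only [hfind]
      norm_num
    · simp only [hfind]
      rw [show (R - 1 - u + k - 1 : Int) = R - 1 - (u - k + 1) by ring]

theorem pv_portA_E (C : Int) (i : Int) (st : PySem.Set (Int × Int) × PySem.Set (Int × Int)) :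
    (PySem.List.pyRange (C - 1) (-1) (-1)).foldl (fun (st : PySem.Set (Int × Int) × PySem.Set (Int × Int)) j =>
        if st.1.contains (i, j) then
          match (PySem.List.pyRange 1 (C - j) 1).find? (fun k => st.2.contains (i, j + k)) with
          | some k => (PySem.Set.add (PySem.Set.discard st.1 (i, j)) (i, j + k - 1),
                       PySem.Set.add st.2 (i, j + k - 1))
          | none => (PySem.Set.add (PySem.Set.discard st.1 (i, j)) (i, C - 1),
                     PySem.Set.add st.2 (i, C - 1))
        else st) st
    = (PySem.List.pyRange 0 C 1).foldl (pvStepA (fun o u => (o, C - 1 - u)) i) st := by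
  rw [pv_range_rev, List.foldl_map]
  congr 1
  funext st' u
  show _ = pvStepA _ i st' u
  simp only [pvStepA]
  rw [show C - (C - 1 - u) = u + 1 by ring]
  have hpred : (fun k => st'.2.contains (i, (C - 1 - u + k : Int))) =
      (fun k => st'.2.contains (i, (C - 1 - (u - k) : Int))) := by
    funext k; rw [show C - 1 - u + k = C - 1 - (u - k) by ring]
  rw [hpred]
  rcases hcon : st'.1.contains (i, (C - 1 - u : Int)) with _ | _
  · simp [hcon]
  · simp only [hcon, if_true]
    rcases hfind : (PySem.List.pyRange 1 (u + 1) 1).find?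
        (fun k => st'.2.contains (i, (C - 1 - (u - k) : Int))) with _ | k
    · simp only [hfind]
      norm_num
    · simp only [hfind]
      rw [show (C - 1 - u + k - 1 : Int) = C - 1 - (u - k + 1) by ring]

-- B's south/east blocks: reversed scan plus the slot counted from the far wall
theorem pv_portB_S (R : Int) (stable : PySem.Set (Int × Int)) (j : Int) (s : PySem.Set (Int × Int)) :
    ((PySem.List.pyRange (R - 1) (-1) (-1)).foldl (fun (st : PySem.Set (Int × Int) × Int) i =>
        let st := if st.1.contains (i, j) then (PySem.Set.add (PySem.Set.discard st.1 (i, j)) (st.2, j), st.2 - 1) else st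
        if stable.contains (i, j) then (st.1, i - 1) else st) (s, R - 1)).1
    = ((PySem.List.pyRange 0 R 1).foldl (pvStepB stable (fun o u => (R - 1 - u, o)) j) (s, 0)).1 := by
  have key : ∀ (l : List Int) (x : PySem.Set (Int × Int)) (a : Int),
      ((l.map (fun u => R - 1 - u)).foldl (fun (st : PySem.Set (Int × Int) × Int) i =>
          let st := if st.1.contains (i, j) then (PySem.Set.add (PySem.Set.discard st.1 (i, j)) (st.2, j), st.2 - 1) else st
          if stable.contains (i, j) then (st.1, i - 1) else st) (x, R - 1 - a)).1
      = ((l.foldl (pvStepB stable (fun o u => (R - 1 - u, o)) j) (x, a))).1 := by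
    intro l
    induction l with
    | nil => intro x a; rfl
    | cons y l ihl =>
      intro x a
      rw [List.map_cons, List.foldl_cons, List.foldl_cons]
      have hstep : (let st := if PySem.Set.contains (x, R - 1 - a).1 ((R - 1 - y : Int), j) then (PySem.Set.add (PySem.Set.discard (x, R - 1 - a).1 ((R - 1 - y : Int), j)) ((x, R - 1 - a).2, j), (x, R - 1 - a).2 - 1) else (x, R - 1 - a)
            if stable.contains ((R - 1 - y : Int), j) then (st.1, R - 1 - y - 1) else st)
          = ((pvStepB stable (fun o u => (R - 1 - u, o)) j (x, a) y).1,
             R - 1 - (pvStepB stable (fun o u => (R - 1 - u, o)) j (x, a) y).2) := by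
        simp only [pvStepB]
        rcases h1 : PySem.Set.contains x ((R - 1 - y : Int), j) with _ | _ <;>
          rcases h2 : stable.contains ((R - 1 - y : Int), j) with _ | _ <;>
            simp [h1, h2, Prod.ext_iff] <;> omega
      rw [hstep]
      exact ihl _ _
  have h0 := key (PySem.List.pyRange 0 R 1) s 0
  rw [show (R - 1 - 0 : Int) = R - 1 by ring] at h0
  rw [pv_range_rev]
  exact h0

theorem pv_portB_E (C : Int) (stable : PySem.Set (Int × Int)) (i : Int) (s : PySem.Set (Int × Int)) :
    ((PySem.List.pyRange (C - 1) (-1) (-1)).foldl (fun (st : PySem.Set (Int × Int) × Int) j =>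
        let st := if st.1.contains (i, j) then (PySem.Set.add (PySem.Set.discard st.1 (i, j)) (i, st.2), st.2 - 1) else st
        if stable.contains (i, j) then (st.1, j - 1) else st) (s, C - 1)).1
    = ((PySem.List.pyRange 0 C 1).foldl (pvStepB stable (fun o u => (o, C - 1 - u)) i) (s, 0)).1 := by
  have key : ∀ (l : List Int) (x : PySem.Set (Int × Int)) (a : Int),
      ((l.map (fun u => C - 1 - u)).foldl (fun (st : PySem.Set (Int × Int) × Int) j =>
          let st := if st.1.contains (i, j) then (PySem.Set.add (PySem.Set.discard st.1 (i, j)) (i, st.2), st.2 - 1) else st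
          if stable.contains (i, j) then (st.1, j - 1) else st) (x, C - 1 - a)).1
      = ((l.foldl (pvStepB stable (fun o u => (o, C - 1 - u)) i) (x, a))).1 := by
    intro l
    induction l with
    | nil => intro x a; rfl
    | cons y l ihl =>
      intro x a
      rw [List.map_cons, List.foldl_cons, List.foldl_cons]
      have hstep : (let st := if PySem.Set.contains (x, C - 1 - a).1 (i, (C - 1 - y : Int)) then (PySem.Set.add (PySem.Set.discard (x, C - 1 - a).1 (i, (C - 1 - y : Int))) (i, (x, C - 1 - a).2), (x, C - 1 - a).2 - 1) else (x, C - 1 - a)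
            if stable.contains (i, (C - 1 - y : Int)) then (st.1, C - 1 - y - 1) else st)
          = ((pvStepB stable (fun o u => (o, C - 1 - u)) i (x, a) y).1,
             C - 1 - (pvStepB stable (fun o u => (o, C - 1 - u)) i (x, a) y).2) := by
        simp only [pvStepB]
        rcases h1 : PySem.Set.contains x (i, (C - 1 - y : Int)) with _ | _ <;>
          rcases h2 : stable.contains (i, (C - 1 - y : Int)) with _ | _ <;>
            simp [h1, h2, Prod.ext_iff] <;> omega
      rw [hstep]
      exact ihl _ _
  have h0 := key (PySem.List.pyRange 0 C 1) s 0
  rw [show (C - 1 - 0 : Int) = C - 1 by ring] at h0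
  rw [pv_range_rev]
  exact h0

-- direction facts: injectivity of the four cell parametrisations
theorem pv_hc_N : ∀ o u o' u' : Int, ((u, o) : Int × Int) = (u', o') → o = o' ∧ u = u' := by
  intro o u o' u' h; rw [Prod.mk.injEq] at h; exact ⟨h.2, h.1⟩
theorem pv_hc_W : ∀ o u o' u' : Int, ((o, u) : Int × Int) = (o', u') → o = o' ∧ u = u' := by
  intro o u o' u' h; rw [Prod.mk.injEq] at h; exact ⟨h.1, h.2⟩
theorem pv_hc_S (R : Int) : ∀ o u o' u' : Int, ((R - 1 - u, o) : Int × Int) = (R - 1 - u', o') → o = o' ∧ u = u' := by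
  intro o u o' u' h; rw [Prod.mk.injEq] at h; exact ⟨h.2, by omega⟩
theorem pv_hc_E (C : Int) : ∀ o u o' u' : Int, ((o, C - 1 - u) : Int × Int) = (o', C - 1 - u') → o = o' ∧ u = u' := by
  intro o u o' u' h; rw [Prod.mk.injEq] at h; exact ⟨h.1, by omega⟩

theorem pv_roll_can (R C : Int) (rocks stb : List (Int × Int)) :
    roll R C rocks stb =
      pvPhaseA (fun o u => (o, C - 1 - u)) C (PySem.List.pyRange 0 R 1)
        (pvPhaseA (fun o u => (R - 1 - u, o)) R (PySem.List.pyRange 0 C 1)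
          (pvPhaseA (fun o u => (o, u)) C (PySem.List.pyRange 0 R 1)
            (pvPhaseA (fun o u => (u, o)) R (PySem.List.pyRange 0 C 1)
              (PySem.Set.ofList rocks) (PySem.Set.ofList stb))
            (PySem.Set.ofList stb))
          (PySem.Set.ofList stb))
        (PySem.Set.ofList stb) := by
  simp only [roll, pvPhaseA, pv_portA_S, pv_portA_E]
  rfl

theorem pv_rollalt_can (R C : Int) (rocks stb : List (Int × Int)) :
    roll_alt R C rocks stb =
      pvPhaseB (PySem.Set.ofList stb) (fun o u => (o, C - 1 - u)) C (PySem.List.pyRange 0 R 1)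
        (pvPhaseB (PySem.Set.ofList stb) (fun o u => (R - 1 - u, o)) R (PySem.List.pyRange 0 C 1)
          (pvPhaseB (PySem.Set.ofList stb) (fun o u => (o, u)) C (PySem.List.pyRange 0 R 1)
            (pvPhaseB (PySem.Set.ofList stb) (fun o u => (u, o)) R (PySem.List.pyRange 0 C 1)
              (PySem.Set.ofList rocks)))) := by
  simp only [roll_alt, pvPhaseB, pv_portB_S, pv_portB_E]
  rfl

theorem pv_main (R C : Int) (rocks stb : List (Int × Int)) :
    roll R C rocks stb = roll_alt R C rocks stb := by
  rw [pv_roll_can, pv_rollalt_can]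
  rw [pv_phase_top _ _ _ pv_hc_N _ (PySem.List.nodup_pyRange_one 0 C),
      pv_phase_top _ _ _ pv_hc_W _ (PySem.List.nodup_pyRange_one 0 R),
      pv_phase_top _ _ _ (pv_hc_S R) _ (PySem.List.nodup_pyRange_one 0 C),
      pv_phase_top _ _ _ (pv_hc_E C) _ (PySem.List.nodup_pyRange_one 0 R)]

-- ===== VERDICT (by name: the statement is the Claim_ definition above) =====
theorem roll_spec : Claim_equal_roll := by
  intro N_ROWS N_COLS rocks stable_rocks _
  unfold Spec_roll
  exact pv_main N_ROWS N_COLS rocks stable_rocks
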